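-- pv_equiv track=rewrite | github.com/SangwhaLee/CodingProb | 프로그래머스/unrated/169199. 리코쳇 로봇/리코쳇 로봇.py | solution
-- ===== SOURCE A (Python) =====
-- from collections import deque
--
-- def solution(board):
--     answer = 0
--     n= len(board)
--     m = len(board[0])
--
--     di = [0,-1,0,1]
--     dj = [-1,0,1,0]
--
--     maps = [[-1]*m for _ in range(n)]
--
--     gi = 0
--     gj = 0
--
--     def dfs(x,y,maps):
--         que = deque()
--         maps[x][y] = 0
--         que.append((x,y))
--
--         while que:
--             i, j = que.popleft()
--
--             for k in range(4):
--                 ni = i + di[k]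
--                 nj = j + dj[k]
--
--                 if ni < 0 or ni >= n or nj < 0 or nj >= m or board[ni][nj] == 'D':
--                     continue
--
--                 while 0 <= ni < n and 0 <= nj < m and board[ni][nj] != 'D':
--                     ni += di[k]
--                     nj += dj[k]
--
--                 ni -= di[k]
--                 nj -= dj[k]
--
--                 if maps[ni][nj] == -1:
--                     que.append((ni,nj))
--                     maps[ni][nj] = maps[i][j] + 1
--
--     for i in range(n):
--         for j in range(m):
--             if board[i][j] == 'R':
--                 dfs(i,j,maps)
--
--             if board[i][j] == 'G':
--                 gi = i
--                 gj = j
--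
--     return maps[gi][gj]
-- ===== SOURCE B (Python) =====
-- from collections import deque
--
-- def solution(board):
--     n = len(board)
--     m = len(board[0])
--
--     # Precompute the slide-stop coordinate from every cell in each of the four
--     # directions, so the BFS reads transitions from tables instead of re-scanning.
--     L = [[0] * m for _ in range(n)]   # stop column sliding left from (i, j)
--     R = [[0] * m for _ in range(n)]   # stop column sliding right
--     U = [[0] * m for _ in range(n)]   # stop row sliding up
--     Dn = [[0] * m for _ in range(n)]  # stop row sliding down
--     for i in range(n):
--         for j in range(m):
--             L[i][j] = j if j == 0 or board[i][j - 1] == 'D' else L[i][j - 1]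
--         for j in range(m - 1, -1, -1):
--             R[i][j] = j if j == m - 1 or board[i][j + 1] == 'D' else R[i][j + 1]
--     for i in range(n):
--         for j in range(m):
--             U[i][j] = i if i == 0 or board[i - 1][j] == 'D' else U[i - 1][j]
--     for i in range(n - 1, -1, -1):
--         for j in range(m):
--             Dn[i][j] = i if i == n - 1 or board[i + 1][j] == 'D' else Dn[i + 1][j]
--
--     dist = [[-1] * m for _ in range(n)]
--
--     def bfs(x, y):
--         dist[x][y] = 0
--         que = deque([(x, y)])
--         while que:
--             i, j = que.popleft()
--             if j > 0 and board[i][j - 1] != 'D':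
--                 ti, tj = i, L[i][j - 1]
--                 if dist[ti][tj] == -1:
--                     dist[ti][tj] = dist[i][j] + 1
--                     que.append((ti, tj))
--             if i > 0 and board[i - 1][j] != 'D':
--                 ti, tj = U[i - 1][j], j
--                 if dist[ti][tj] == -1:
--                     dist[ti][tj] = dist[i][j] + 1
--                     que.append((ti, tj))
--             if j < m - 1 and board[i][j + 1] != 'D':
--                 ti, tj = i, R[i][j + 1]
--                 if dist[ti][tj] == -1:
--                     dist[ti][tj] = dist[i][j] + 1
--                     que.append((ti, tj))
--             if i < n - 1 and board[i + 1][j] != 'D':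
--                 ti, tj = Dn[i + 1][j], j
--                 if dist[ti][tj] == -1:
--                     dist[ti][tj] = dist[i][j] + 1
--                     que.append((ti, tj))
--
--     gi = gj = 0
--     for i in range(n):
--         for j in range(m):
--             if board[i][j] == 'R':
--                 bfs(i, j)
--             if board[i][j] == 'G':
--                 gi, gj = i, j
--
--     return dist[gi][gj]
-- ===== Notes on version B (the rewrite author's own statement) =====
-- stated objective: alternative
-- what changed: B precomputes four slide-stop tables (left/right/up/down) by dynamic programming over the grid and the BFS reads each transition from them, instead of A's cell-by-cell while-loop slide inside the BFS; it trades four extra O(nm) table-building passes for O(1) transitions, which a timing run does not reward on the generated boards.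
-- outside the precondition, e.g. on solution([]): A raises IndexError, B raises IndexError; on solution(['RG', 'D']): A raises IndexError, B raises IndexError; on solution(['']): A raises IndexError, B raises IndexError
import Mathlib
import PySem

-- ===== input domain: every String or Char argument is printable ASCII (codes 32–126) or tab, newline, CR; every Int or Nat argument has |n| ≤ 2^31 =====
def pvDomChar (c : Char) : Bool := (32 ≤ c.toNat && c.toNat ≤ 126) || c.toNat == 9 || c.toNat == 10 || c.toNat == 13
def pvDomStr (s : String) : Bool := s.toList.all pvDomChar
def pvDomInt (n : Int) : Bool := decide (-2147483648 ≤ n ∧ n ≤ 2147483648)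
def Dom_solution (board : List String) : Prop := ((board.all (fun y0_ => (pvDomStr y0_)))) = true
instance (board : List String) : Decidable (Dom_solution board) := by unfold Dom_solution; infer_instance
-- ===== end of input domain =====

-- B precomputes four slide-stop tables by dynamic programming and the BFS reads each
-- transition from them instead of re-scanning cell by cell (alternative algorithm).

-- ===== PORT A =====
-- board[i][j] (used only under 0 <= i < n, 0 <= j < m range guards, as in the Python)
def pvCell (board : List String) (i j : Int) : Char :=
  ((board.getD i.natAbs "").toList.getD j.natAbs ' ')

-- grid[i][j] and grid[i][j] = v on the int grid (indices in range wherever used)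
def pvGrid2 (g : List (List Int)) (i j : Int) : Int :=
  (g.getD i.natAbs []).getD j.natAbs 0

def pvSet2 (g : List (List Int)) (i j : Int) (v : Int) : List (List Int) :=
  g.set i.natAbs ((g.getD i.natAbs []).set j.natAbs v)

def pvDi (k : Nat) : Int := [0, -1, 0, 1].getD k 0
def pvDj (k : Nat) : Int := [-1, 0, 1, 0].getD k 0

-- the inner `while 0 <= ni < n and 0 <= nj < m and board[ni][nj] != 'D'` (fuel n+m+2 always suffices)
def slideA (board : List String) (n m dik djk : Int) : Nat → Int → Int → Int × Int
  | 0, ni, nj => (ni, nj)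
  | f + 1, ni, nj =>
    if 0 ≤ ni ∧ ni < n ∧ 0 ≤ nj ∧ nj < m ∧ pvCell board ni nj ≠ 'D'
    then slideA board n m dik djk f (ni + dik) (nj + djk)
    else (ni, nj)

-- body of `for k in range(4)` for one popped (i, j); state = (que, maps)
def stepA (board : List String) (n m i j : Int)
    (st : List (Int × Int) × List (List Int)) (k : Nat) :
    List (Int × Int) × List (List Int) :=
  let ni := i + pvDi k
  let nj := j + pvDj k
  if ni < 0 ∨ n ≤ ni ∨ nj < 0 ∨ m ≤ nj ∨ pvCell board ni nj = 'D' then st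
  else
    let p := slideA board n m (pvDi k) (pvDj k) (n.toNat + m.toNat + 2) ni nj
    let si := p.1 - pvDi k
    let sj := p.2 - pvDj k
    if pvGrid2 st.2 si sj = -1 then
      (st.1 ++ [(si, sj)], pvSet2 st.2 si sj (pvGrid2 st.2 i j + 1))
    else st

-- the `while que` loop (fuel n*m+2 always suffices: each pop was one enqueue of a fresh cell)
def bfsA (board : List String) (n m : Int) :
    Nat → List (Int × Int) → List (List Int) → List (List Int)
  | 0, _, maps => maps
  | _ + 1, [], maps => maps
  | f + 1, (i, j) :: rest, maps =>
    let st := (List.range 4).foldl (stepA board n m i j) (rest, maps)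
    bfsA board n m f st.1 st.2

def dfsA (board : List String) (n m x y : Int) (maps : List (List Int)) : List (List Int) :=
  bfsA board n m (n.toNat * m.toNat + 2) [(x, y)] (pvSet2 maps x y 0)

def solution (board : List String) : Int :=
  let n : Int := board.length
  let m : Int := PySem.Str.len (board.headD "")   -- len(board[0]); Pre_ excludes board = []
  let maps0 := List.replicate n.toNat (List.replicate m.toNat (-1 : Int))
  let st := (List.range n.toNat).foldl (fun st i =>
    (List.range m.toNat).foldl (fun st j =>
      let st := if pvCell board i j = 'R' then (dfsA board n m i j st.1, st.2) else st
      if pvCell board i j = 'G' then (st.1, ((i : Int), (j : Int))) else st) st)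
    (maps0, ((0 : Int), (0 : Int)))
  pvGrid2 st.1 st.2.1 st.2.2

-- ===== PORT B =====
-- rows truncated to width m (only columns < m are ever read)
def pvRowsm (board : List String) (m : Int) : List (List Char) :=
  board.map (fun s => s.toList.take m.toNat)

-- L[i][j] = j if j == 0 or board[i][j-1] == 'D' else L[i][j-1]  (left-to-right pass)
def stopLRowAux : List Char → Int → Bool → Int → List Int
  | [], _, _, _ => []
  | c :: cs, j, blocked, prev =>
    let s := if blocked then j else prev
    s :: stopLRowAux cs (j + 1) (c == 'D') s

def stopLRow (row : List Char) : List Int := stopLRowAux row 0 true 0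

-- R[i][j] = j if j == m-1 or board[i][j+1] == 'D' else R[i][j+1]  (right-to-left pass)
def stopRRow : List Char → Int → List Int
  | [], _ => []
  | _ :: cs, j =>
    let rest := stopRRow cs (j + 1)
    (match cs with
     | [] => j
     | c' :: _ => if c' == 'D' then j else rest.headD j) :: rest

-- one row of U: U[i][j] = i if i == 0 or board[i-1][j] == 'D' else U[i-1][j]
def stopURow (i : Int) (m : Nat) (prev : Option (List Char × List Int)) : List Int :=
  (List.range m).map (fun jn =>
    match prev with
    | none => i
    | some (pc, ps) => if pc.getD jn ' ' == 'D' then i else ps.getD jn 0)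

def stopUGrid : List (List Char) → Int → Nat → Option (List Char × List Int) → List (List Int)
  | [], _, _, _ => []
  | r :: rs, i, m, prev =>
    let cur := stopURow i m prev
    cur :: stopUGrid rs (i + 1) m (some (r, cur))

-- D[i][j] = i if i == n-1 or board[i+1][j] == 'D' else D[i+1][j]  (bottom-up pass)
def stopDGrid : List (List Char) → Int → Nat → List (List Int)
  | [], _, _ => []
  | _r :: rs, i, m =>
    let rest := stopDGrid rs (i + 1) m
    ((List.range m).map (fun jn =>
      match rs, rest with
      | r' :: _, ps :: _ => if r'.getD jn ' ' == 'D' then i else ps.getD jn 0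
      | _, _ => i)) :: rest

def tabL (board : List String) (m : Int) : List (List Int) := (pvRowsm board m).map stopLRow
def tabR (board : List String) (m : Int) : List (List Int) :=
  (pvRowsm board m).map (fun r => stopRRow r 0)
def tabU (board : List String) (m : Int) : List (List Int) :=
  stopUGrid (pvRowsm board m) 0 m.toNat none
def tabD (board : List String) (m : Int) : List (List Int) :=
  stopDGrid (pvRowsm board m) 0 m.toNat

-- `if dist[ti][tj] == -1: dist[ti][tj] = dist[i][j] + 1; que.append((ti, tj))`
def relaxB (st : List (Int × Int) × List (List Int)) (i j ti tj : Int) :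
    List (Int × Int) × List (List Int) :=
  if pvGrid2 st.2 ti tj = -1 then
    (st.1 ++ [(ti, tj)], pvSet2 st.2 ti tj (pvGrid2 st.2 i j + 1))
  else st

def bfsB (board : List String) (n m : Int) (tL tU tR tD : List (List Int)) :
    Nat → List (Int × Int) → List (List Int) → List (List Int)
  | 0, _, dist => dist
  | _ + 1, [], dist => dist
  | f + 1, (i, j) :: rest, dist =>
    let st := (rest, dist)
    let st := if 0 < j ∧ pvCell board i (j - 1) ≠ 'D' then relaxB st i j i (pvGrid2 tL i (j - 1)) else st
    let st := if 0 < i ∧ pvCell board (i - 1) j ≠ 'D' then relaxB st i j (pvGrid2 tU (i - 1) j) j else st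
    let st := if j < m - 1 ∧ pvCell board i (j + 1) ≠ 'D' then relaxB st i j i (pvGrid2 tR i (j + 1)) else st
    let st := if i < n - 1 ∧ pvCell board (i + 1) j ≠ 'D' then relaxB st i j (pvGrid2 tD (i + 1) j) j else st
    bfsB board n m tL tU tR tD f st.1 st.2

def solution_alt (board : List String) : Int :=
  let n : Int := board.length
  let m : Int := PySem.Str.len (board.headD "")   -- len(board[0]); Pre_ excludes board = []
  let dist0 := List.replicate n.toNat (List.replicate m.toNat (-1 : Int))
  let st := (List.range n.toNat).foldl (fun st i =>
    (List.range m.toNat).foldl (fun st j =>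
      let st := if pvCell board i j = 'R' then
          (bfsB board n m (tabL board m) (tabU board m) (tabR board m) (tabD board m)
            (n.toNat * m.toNat + 2) [((i : Int), (j : Int))] (pvSet2 st.1 i j 0), st.2)
        else st
      if pvCell board i j = 'G' then (st.1, ((i : Int), (j : Int))) else st) st)
    (dist0, ((0 : Int), (0 : Int)))
  pvGrid2 st.1 st.2.1 st.2.2

-- ===== PRECONDITION & SPEC =====
-- Pre_ excludes exactly the boards on which the Python A raises IndexError: an empty board
-- (board[0]), a zero-width first row (maps[gi][gj]), or a later row shorter than the first
-- (board[i][j] in the scan).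
def Pre_solution (board : List String) : Prop :=
  board ≠ [] ∧ 0 < PySem.Str.len (board.headD "") ∧
    ∀ s ∈ board, PySem.Str.len (board.headD "") ≤ PySem.Str.len s
instance (board : List String) : Decidable (Pre_solution board) := by
  unfold Pre_solution; infer_instance
def pvWitness_solution : List String := ["R.G", "..D"]
def Spec_solution (board : List String) (out : Int) : Prop := out = solution_alt board
instance (board : List String) (out : Int) : Decidable (Spec_solution board out) := by
  unfold Spec_solution; infer_instance

-- ===== CLAIM (what is proved, stated in full; the proofs are below) =====
def Claim_equal_solution : Prop :=
  ∀ (board : List String), Dom_solution board → Pre_solution board →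
    Spec_solution board (solution board)

-- ===== LEMMAS AND PROOFS =====

-- n, m are the actual dimensions and every row has width ≥ m
def Good (board : List String) (n m : Int) : Prop :=
  n = board.length ∧ 0 < m ∧ ∀ s ∈ board, m ≤ PySem.Str.len s

theorem rowsm_length (board : List String) (m : Int) :
    (pvRowsm board m).length = board.length := by
  simp [pvRowsm]

theorem getD_map_of_lt {α β : Type} (f : α → β) (l : List α) (t : Nat) (d : β) (dflt : α)
    (ht : t < l.length) : (l.map f).getD t d = f (l.getD t dflt) := by
  rw [List.getD_eq_getElem _ _ (by simpa using ht), List.getD_eq_getElem _ _ ht,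
    List.getElem_map]

theorem rowsm_row_length (board : List String) (n m : Int) (hg : Good board n m)
    (t : Nat) (ht : t < board.length) :
    ((pvRowsm board m).getD t []).length = m.toNat := by
  rcases hg with ⟨hn, hm0, hrow⟩
  rw [pvRowsm, getD_map_of_lt _ _ _ _ "" ht, List.length_take]
  have hmem : board.getD t "" ∈ board := by
    rw [List.getD_eq_getElem _ _ ht]; exact List.getElem_mem ht
  have := hrow _ hmem
  rw [PySem.Str.len_eq] at this
  omega

theorem rowsm_getD (board : List String) (n m : Int) (hg : Good board n m)
    (t jn : Nat) (ht : t < board.length) (hj : jn < m.toNat) :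
    ((pvRowsm board m).getD t []).getD jn ' ' = pvCell board t jn := by
  rcases hg with ⟨hn, hm0, hrow⟩
  have hmem : board.getD t "" ∈ board := by
    rw [List.getD_eq_getElem _ _ ht]; exact List.getElem_mem ht
  have hlen := hrow _ hmem
  rw [PySem.Str.len_eq] at hlen
  have hjl : jn < ((board.getD t "").toList.take m.toNat).length := by
    rw [List.length_take]; omega
  have hjl' : jn < (board.getD t "").toList.length := by omega
  rw [pvRowsm, getD_map_of_lt _ _ _ _ "" ht, List.getD_eq_getElem _ _ hjl,
    List.getElem_take, pvCell]
  have h1 : ((t : Int)).natAbs = t := by omega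
  have h2 : ((jn : Int)).natAbs = jn := by omega
  rw [h1, h2, List.getD_eq_getElem _ _ hjl']

-- ---- left table ----
theorem stopLRowAux_getD_zero (c : Char) (cs : List Char) (j : Int) (b : Bool) (p d : Int) :
    (stopLRowAux (c :: cs) j b p).getD 0 d = if b then j else p := by
  simp [stopLRowAux]

theorem stopLRowAux_getD_succ (cs : List Char) : ∀ (j : Int) (b : Bool) (p d : Int) (t : Nat),
    t + 1 < cs.length →
    (stopLRowAux cs j b p).getD (t + 1) d =
      if cs.getD t ' ' = 'D' then j + (t : Int) + 1
      else (stopLRowAux cs j b p).getD t d := by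
  induction cs with
  | nil => intro j b p d t h; simp at h
  | cons c cs ih =>
    intro j b p d t h
    cases t with
    | zero =>
      match cs, h with
      | c' :: cs', _ =>
        by_cases hc : c = 'D' <;>
          simp [stopLRowAux, hc, List.getD]
    | succ t =>
      have h' : t + 1 < cs.length := by simpa using h
      have := ih (j + 1) (c == 'D') (if b then j else p) d t h'
      simp only [stopLRowAux, List.getD_cons_succ]
      rw [this]
      have harith : j + 1 + (t : Int) + 1 = j + ((t : Nat) + 1 : Nat) + 1 := by push_cast; ring
      rw [harith]

theorem tabL_rec (board : List String) (n m : Int) (hg : Good board n m) (i j : Int)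
    (hi : 0 ≤ i) (hin : i < n) (hj : 0 ≤ j) (hjm : j < m) :
    pvGrid2 (tabL board m) i j =
      if j = 0 ∨ pvCell board i (j - 1) = 'D' then j
      else pvGrid2 (tabL board m) i (j - 1) := by
  obtain ⟨hn, hm0, hrow⟩ := hg
  have htb : i.natAbs < board.length := by omega
  have hrowlen := rowsm_row_length board n m ⟨hn, hm0, hrow⟩ i.natAbs htb
  have hmap : (tabL board m).getD i.natAbs [] = stopLRow ((pvRowsm board m).getD i.natAbs []) := by
    rw [tabL, getD_map_of_lt _ _ _ _ [] (by rw [rowsm_length]; exact htb)]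
  have hgrid : ∀ j' : Int, pvGrid2 (tabL board m) i j' =
      (stopLRowAux ((pvRowsm board m).getD i.natAbs []) 0 true 0).getD j'.natAbs 0 := by
    intro j'; rw [pvGrid2, hmap, stopLRow]
  rw [hgrid j, hgrid (j - 1)]
  by_cases hj0 : j = 0
  · subst hj0
    have hne : (pvRowsm board m).getD i.natAbs [] ≠ [] := by
      intro hnil; rw [hnil] at hrowlen; simp at hrowlen; omega
    obtain ⟨c, cs, hcons⟩ := List.exists_cons_of_ne_nil hne
    rw [if_pos (Or.inl rfl), hcons]
    have : (0 : Int).natAbs = 0 := rfl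
    rw [this, stopLRowAux_getD_zero]
    simp
  · have h1 : j.natAbs = (j - 1).natAbs + 1 := by omega
    have hlt : (j - 1).natAbs + 1 < ((pvRowsm board m).getD i.natAbs []).length := by
      rw [hrowlen]; omega
    rw [h1, stopLRowAux_getD_succ _ 0 true 0 0 _ hlt]
    have hcell : ((pvRowsm board m).getD i.natAbs []).getD (j - 1).natAbs ' ' =
        pvCell board i (j - 1) := by
      have h := rowsm_getD board n m ⟨hn, hm0, hrow⟩ i.natAbs (j - 1).natAbs htb (by omega)
      have e1 : ((i.natAbs : Nat) : Int) = i := by omega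
      have e2 : (((j - 1).natAbs : Nat) : Int) = j - 1 := by omega
      rw [e1, e2] at h; exact h
    rw [hcell]
    by_cases hD : pvCell board i (j - 1) = 'D'
    · rw [if_pos hD, if_pos (Or.inr hD)]; omega
    · rw [if_neg hD, if_neg (by tauto)]

theorem tabL_bounds_aux (board : List String) (n m : Int) (hg : Good board n m) :
    ∀ (jn : Nat) (i j : Int), 0 ≤ i → i < n → j = (jn : Int) → j < m →
    0 ≤ pvGrid2 (tabL board m) i j ∧ pvGrid2 (tabL board m) i j ≤ j := by
  intro jn
  induction jn with
  | zero =>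
    intro i j hi hin hj hjm
    rw [tabL_rec board n m hg i j hi hin (by omega) hjm, if_pos (Or.inl (by omega))]
    omega
  | succ t ih =>
    intro i j hi hin hj hjm
    rw [tabL_rec board n m hg i j hi hin (by omega) hjm]
    split_ifs with h
    · omega
    · have := ih i (j - 1) hi hin (by omega) (by omega)
      omega

theorem tabL_bounds (board : List String) (n m : Int) (hg : Good board n m) (i j : Int)
    (hi : 0 ≤ i) (hin : i < n) (hj : 0 ≤ j) (hjm : j < m) :
    0 ≤ pvGrid2 (tabL board m) i j ∧ pvGrid2 (tabL board m) i j ≤ j := by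
  exact tabL_bounds_aux board n m hg j.toNat i j hi hin (by omega) hjm

-- ---- right table ----
theorem stopRRow_getD (cs : List Char) : ∀ (j0 d : Int) (t : Nat), t < cs.length →
    (stopRRow cs j0).getD t d =
      if t + 1 = cs.length ∨ cs.getD (t + 1) ' ' = 'D' then j0 + (t : Int)
      else (stopRRow cs j0).getD (t + 1) d := by
  induction cs with
  | nil => intro j0 d t h; simp at h
  | cons c cs ih =>
    intro j0 d t h
    cases t with
    | zero =>
      cases cs with
      | nil => simp [stopRRow, List.getD]
      | cons c' cs' =>
        by_cases hc : c' = 'D' <;>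
          simp [stopRRow, hc, List.getD]
    | succ t =>
      have h' : t < cs.length := by simpa using h
      simp only [stopRRow, List.getD_cons_succ]
      rw [ih (j0 + 1) d t h']
      have hcond : (t + 1 = cs.length ∨ cs.getD (t + 1) ' ' = 'D') ↔
          (t + 1 + 1 = (c :: cs).length ∨ (c :: cs).getD (t + 1 + 1) ' ' = 'D') := by
        rw [List.length_cons, List.getD_cons_succ]
        exact or_congr (by omega) Iff.rfl
      simp only [hcond]
      have hval : j0 + 1 + (t : Int) = j0 + ((t + 1 : Nat) : Int) := by push_cast; ring
      rw [hval]
      simp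

theorem tabR_rec (board : List String) (n m : Int) (hg : Good board n m) (i j : Int)
    (hi : 0 ≤ i) (hin : i < n) (hj : 0 ≤ j) (hjm : j < m) :
    pvGrid2 (tabR board m) i j =
      if j = m - 1 ∨ pvCell board i (j + 1) = 'D' then j
      else pvGrid2 (tabR board m) i (j + 1) := by
  obtain ⟨hn, hm0, hrow⟩ := hg
  have htb : i.natAbs < board.length := by omega
  have hrowlen := rowsm_row_length board n m ⟨hn, hm0, hrow⟩ i.natAbs htb
  have hmap : (tabR board m).getD i.natAbs [] =
      stopRRow ((pvRowsm board m).getD i.natAbs []) 0 := by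
    rw [tabR, getD_map_of_lt _ _ _ _ [] (by rw [rowsm_length]; exact htb)]
  have hgrid : ∀ j' : Int, pvGrid2 (tabR board m) i j' =
      (stopRRow ((pvRowsm board m).getD i.natAbs []) 0).getD j'.natAbs 0 := by
    intro j'; rw [pvGrid2, hmap]
  rw [hgrid j, hgrid (j + 1)]
  have hlt : j.natAbs < ((pvRowsm board m).getD i.natAbs []).length := by rw [hrowlen]; omega
  rw [stopRRow_getD _ 0 0 j.natAbs hlt]
  by_cases hlast : j = m - 1
  · rw [if_pos (by left; rw [hrowlen]; omega), if_pos (Or.inl hlast)]; omega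
  · have hcell : ((pvRowsm board m).getD i.natAbs []).getD (j.natAbs + 1) ' ' =
        pvCell board i (j + 1) := by
      have h := rowsm_getD board n m ⟨hn, hm0, hrow⟩ i.natAbs (j.natAbs + 1) htb (by omega)
      have e1 : ((i.natAbs : Nat) : Int) = i := by omega
      have e2 : ((j.natAbs + 1 : Nat) : Int) = j + 1 := by omega
      rw [e1, e2] at h; exact h
    rw [hcell]
    by_cases hD : pvCell board i (j + 1) = 'D'
    · rw [if_pos (Or.inr hD), if_pos (Or.inr hD)]; omega
    · rw [if_neg (by rw [hrowlen]; push Not; exact ⟨by omega, hD⟩),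
        if_neg (by tauto)]
      have e3 : (j + 1).natAbs = j.natAbs + 1 := by omega
      rw [e3]

theorem tabR_bounds_aux (board : List String) (n m : Int) (hg : Good board n m) :
    ∀ (rn : Nat) (i j : Int), 0 ≤ i → i < n → m - 1 - j = (rn : Int) → 0 ≤ j →
    j ≤ pvGrid2 (tabR board m) i j ∧ pvGrid2 (tabR board m) i j ≤ m - 1 := by
  intro rn
  induction rn with
  | zero =>
    intro i j hi hin hj hj0
    rw [tabR_rec board n m hg i j hi hin hj0 (by omega), if_pos (Or.inl (by omega))]
    omega
  | succ t ih =>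
    intro i j hi hin hj hj0
    rw [tabR_rec board n m hg i j hi hin hj0 (by omega)]
    split_ifs with h
    · omega
    · have := ih i (j + 1) hi hin (by omega) (by omega)
      omega

theorem tabR_bounds (board : List String) (n m : Int) (hg : Good board n m) (i j : Int)
    (hi : 0 ≤ i) (hin : i < n) (hj : 0 ≤ j) (hjm : j < m) :
    j ≤ pvGrid2 (tabR board m) i j ∧ pvGrid2 (tabR board m) i j ≤ m - 1 := by
  exact tabR_bounds_aux board n m hg (m - 1 - j).toNat i j hi hin (by omega) hj

-- ---- up table ----
theorem stopUGrid_getD_succ (rs : List (List Char)) : ∀ (i : Int) (m : Nat) prev (t jn : Nat),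
    t + 1 < rs.length → jn < m →
    ((stopUGrid rs i m prev).getD (t + 1) []).getD jn 0 =
      if (rs.getD t []).getD jn ' ' = 'D' then i + (t : Int) + 1
      else ((stopUGrid rs i m prev).getD t []).getD jn 0 := by
  induction rs with
  | nil => intro i m prev t jn h hj; simp at h
  | cons r rs ih =>
    intro i m prev t jn h hj
    cases t with
    | zero =>
      cases rs with
      | nil => simp at h
      | cons r2 rs2 =>
        simp only [stopUGrid, List.getD_cons_succ, List.getD_cons_zero]
        rw [stopURow, PySem.List.getD_map_range _ _ _ _ hj]
        simp
    | succ t =>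
      have h' : t + 1 < rs.length := by simpa using h
      simp only [stopUGrid, List.getD_cons_succ]
      rw [ih (i + 1) m (some (r, stopURow i m prev)) t jn h' hj]
      have hval : i + 1 + (t : Int) + 1 = i + ((t + 1 : Nat) : Int) + 1 := by push_cast; ring
      rw [hval]

theorem tabU_rec (board : List String) (n m : Int) (hg : Good board n m) (i j : Int)
    (hi : 0 ≤ i) (hin : i < n) (hj : 0 ≤ j) (hjm : j < m) :
    pvGrid2 (tabU board m) i j =
      if i = 0 ∨ pvCell board (i - 1) j = 'D' then i
      else pvGrid2 (tabU board m) (i - 1) j := by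
  obtain ⟨hn, hm0, hrow⟩ := hg
  have hgrid : ∀ (i' j' : Int), pvGrid2 (tabU board m) i' j' =
      ((stopUGrid (pvRowsm board m) 0 m.toNat none).getD i'.natAbs []).getD j'.natAbs 0 := by
    intro i' j'; rw [pvGrid2, tabU]
  rw [hgrid i j, hgrid (i - 1) j]
  by_cases hi0 : i = 0
  · subst hi0
    have hne : pvRowsm board m ≠ [] := by
      have hb : 0 < board.length := by omega
      intro hnil
      rw [pvRowsm] at hnil
      simp only [List.map_eq_nil_iff] at hnil
      rw [hnil] at hb; simp at hb
    obtain ⟨r, rs, hcons⟩ := List.exists_cons_of_ne_nil hne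
    rw [if_pos (Or.inl rfl), hcons]
    have h0 : (0 : Int).natAbs = 0 := rfl
    rw [h0]
    simp only [stopUGrid, List.getD_cons_zero]
    rw [stopURow, PySem.List.getD_map_range _ _ _ _ (by omega : j.natAbs < m.toNat)]
  · have h1 : i.natAbs = (i - 1).natAbs + 1 := by omega
    have hlt : (i - 1).natAbs + 1 < (pvRowsm board m).length := by
      rw [rowsm_length]; omega
    rw [h1, stopUGrid_getD_succ _ 0 m.toNat none (i - 1).natAbs j.natAbs hlt (by omega)]
    have hcell : ((pvRowsm board m).getD (i - 1).natAbs []).getD j.natAbs ' ' =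
        pvCell board (i - 1) j := by
      have h := rowsm_getD board n m ⟨hn, hm0, hrow⟩ (i - 1).natAbs j.natAbs (by omega) (by omega)
      have e1 : (((i - 1).natAbs : Nat) : Int) = i - 1 := by omega
      have e2 : ((j.natAbs : Nat) : Int) = j := by omega
      rw [e1, e2] at h; exact h
    rw [hcell]
    by_cases hD : pvCell board (i - 1) j = 'D'
    · rw [if_pos hD, if_pos (Or.inr hD)]; omega
    · rw [if_neg hD, if_neg (by tauto)]

theorem tabU_bounds_aux (board : List String) (n m : Int) (hg : Good board n m) :
    ∀ (ikn : Nat) (i j : Int), 0 ≤ j → j < m → i = (ikn : Int) → i < n →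
    0 ≤ pvGrid2 (tabU board m) i j ∧ pvGrid2 (tabU board m) i j ≤ i := by
  intro ikn
  induction ikn with
  | zero =>
    intro i j hj hjm hi hin
    rw [tabU_rec board n m hg i j (by omega) hin hj hjm, if_pos (Or.inl (by omega))]
    omega
  | succ t ih =>
    intro i j hj hjm hi hin
    rw [tabU_rec board n m hg i j (by omega) hin hj hjm]
    split_ifs with h
    · omega
    · have := ih (i - 1) j hj hjm (by omega) (by omega)
      omega

theorem tabU_bounds (board : List String) (n m : Int) (hg : Good board n m) (i j : Int)
    (hi : 0 ≤ i) (hin : i < n) (hj : 0 ≤ j) (hjm : j < m) :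
    0 ≤ pvGrid2 (tabU board m) i j ∧ pvGrid2 (tabU board m) i j ≤ i := by
  exact tabU_bounds_aux board n m hg i.toNat i j hj hjm (by omega) hin

-- ---- down table ----
theorem stopDGrid_getD (rs : List (List Char)) : ∀ (i : Int) (m : Nat) (t jn : Nat),
    t < rs.length → jn < m →
    ((stopDGrid rs i m).getD t []).getD jn 0 =
      if t + 1 = rs.length ∨ (rs.getD (t + 1) []).getD jn ' ' = 'D' then i + (t : Int)
      else ((stopDGrid rs i m).getD (t + 1) []).getD jn 0 := by
  induction rs with
  | nil => intro i m t jn h hj; simp at h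
  | cons r rs ih =>
    intro i m t jn h hj
    cases t with
    | zero =>
      cases rs with
      | nil =>
        simp only [stopDGrid, List.getD_cons_zero]
        rw [PySem.List.getD_map_range _ _ _ _ hj]
        simp
      | cons r2 rs2 =>
        simp only [stopDGrid, List.getD_cons_zero, List.getD_cons_succ]
        rw [PySem.List.getD_map_range _ _ _ _ hj]
        simp
    | succ t =>
      have h' : t < rs.length := by simpa using h
      simp only [stopDGrid, List.getD_cons_succ]
      rw [ih (i + 1) m t jn h' hj]
      have hcond : (t + 1 = rs.length ∨ (rs.getD (t + 1) []).getD jn ' ' = 'D') ↔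
          (t + 1 + 1 = (r :: rs).length ∨ ((r :: rs).getD (t + 1 + 1) []).getD jn ' ' = 'D') := by
        rw [List.length_cons, List.getD_cons_succ]
        exact or_congr (by omega) Iff.rfl
      simp only [hcond]
      have hval : i + 1 + (t : Int) = i + ((t + 1 : Nat) : Int) := by push_cast; ring
      rw [hval]
      simp

theorem tabD_rec (board : List String) (n m : Int) (hg : Good board n m) (i j : Int)
    (hi : 0 ≤ i) (hin : i < n) (hj : 0 ≤ j) (hjm : j < m) :
    pvGrid2 (tabD board m) i j =
      if i = n - 1 ∨ pvCell board (i + 1) j = 'D' then i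
      else pvGrid2 (tabD board m) (i + 1) j := by
  obtain ⟨hn, hm0, hrow⟩ := hg
  have hgrid : ∀ (i' j' : Int), pvGrid2 (tabD board m) i' j' =
      ((stopDGrid (pvRowsm board m) 0 m.toNat).getD i'.natAbs []).getD j'.natAbs 0 := by
    intro i' j'; rw [pvGrid2, tabD]
  rw [hgrid i j, hgrid (i + 1) j]
  have hlt : i.natAbs < (pvRowsm board m).length := by rw [rowsm_length]; omega
  rw [stopDGrid_getD _ 0 m.toNat i.natAbs j.natAbs hlt (by omega)]
  by_cases hlast : i = n - 1
  · rw [if_pos (by left; rw [rowsm_length]; omega), if_pos (Or.inl hlast)]; omega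
  · have hcell : ((pvRowsm board m).getD (i.natAbs + 1) []).getD j.natAbs ' ' =
        pvCell board (i + 1) j := by
      have h := rowsm_getD board n m ⟨hn, hm0, hrow⟩ (i.natAbs + 1) j.natAbs (by omega) (by omega)
      have e1 : ((i.natAbs + 1 : Nat) : Int) = i + 1 := by omega
      have e2 : ((j.natAbs : Nat) : Int) = j := by omega
      rw [e1, e2] at h; exact h
    rw [hcell]
    by_cases hD : pvCell board (i + 1) j = 'D'
    · rw [if_pos (Or.inr hD), if_pos (Or.inr hD)]; omega
    · rw [if_neg (by rw [rowsm_length]; push Not; exact ⟨by omega, hD⟩),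
        if_neg (by tauto)]
      have e3 : (i + 1).natAbs = i.natAbs + 1 := by omega
      rw [e3]

theorem tabD_bounds_aux (board : List String) (n m : Int) (hg : Good board n m) :
    ∀ (rn : Nat) (i j : Int), 0 ≤ j → j < m → n - 1 - i = (rn : Int) → 0 ≤ i →
    i ≤ pvGrid2 (tabD board m) i j ∧ pvGrid2 (tabD board m) i j ≤ n - 1 := by
  intro rn
  induction rn with
  | zero =>
    intro i j hj hjm hi hi0
    rw [tabD_rec board n m hg i j hi0 (by omega) hj hjm, if_pos (Or.inl (by omega))]
    omega
  | succ t ih =>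
    intro i j hj hjm hi hi0
    rw [tabD_rec board n m hg i j hi0 (by omega) hj hjm]
    split_ifs with h
    · omega
    · have := ih (i + 1) j hj hjm (by omega) (by omega)
      omega

theorem tabD_bounds (board : List String) (n m : Int) (hg : Good board n m) (i j : Int)
    (hi : 0 ≤ i) (hin : i < n) (hj : 0 ≤ j) (hjm : j < m) :
    i ≤ pvGrid2 (tabD board m) i j ∧ pvGrid2 (tabD board m) i j ≤ n - 1 := by
  exact tabD_bounds_aux board n m hg (n - 1 - i).toNat i j hj hjm (by omega) hi

-- ---- slides = tables ----
theorem slide_left (board : List String) (n m : Int) (hg : Good board n m) :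
    ∀ (jn f : Nat) (i j : Int), j = (jn : Int) → jn + 2 ≤ f →
    0 ≤ i → i < n → j < m → pvCell board i j ≠ 'D' →
    slideA board n m 0 (-1) f i j = (i, pvGrid2 (tabL board m) i j - 1) := by
  intro jn
  induction jn with
  | zero =>
    intro f i j hj hf hi hin hjm hD
    obtain ⟨f1, rfl⟩ : ∃ f1, f = f1 + 1 + 1 := ⟨f - 2, by omega⟩
    rw [slideA, if_pos ⟨hi, hin, by omega, hjm, hD⟩]
    have e1 : i + 0 = i := by ring
    have e2 : j + -1 = -1 := by omega
    rw [e1, e2, slideA, if_neg (by rintro ⟨-, -, h3, -⟩; omega)]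
    rw [tabL_rec board n m hg i j hi hin (by omega) hjm, if_pos (Or.inl (by omega))]
    rw [show j - 1 = -1 by omega]
  | succ t ih =>
    intro f i j hj hf hi hin hjm hD
    obtain ⟨f1, rfl⟩ : ∃ f1, f = f1 + 1 := ⟨f - 1, by omega⟩
    rw [slideA, if_pos ⟨hi, hin, by omega, hjm, hD⟩]
    have e1 : i + 0 = i := by ring
    have e2 : j + -1 = j - 1 := by ring
    rw [e1, e2]
    rw [tabL_rec board n m hg i j hi hin (by omega) hjm]
    by_cases hD' : pvCell board i (j - 1) = 'D'
    · rw [if_pos (Or.inr hD')]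
      obtain ⟨f2, rfl⟩ : ∃ f2, f1 = f2 + 1 := ⟨f1 - 1, by omega⟩
      rw [slideA, if_neg (by rintro ⟨-, -, -, -, hcell⟩; exact hcell hD')]
    · rw [if_neg (by push Not; exact ⟨by omega, hD'⟩)]
      exact ih f1 i (j - 1) (by omega) (by omega) hi hin (by omega) hD' 

theorem slide_right (board : List String) (n m : Int) (hg : Good board n m) :
    ∀ (rn f : Nat) (i j : Int), m - 1 - j = (rn : Int) → rn + 2 ≤ f →
    0 ≤ i → i < n → 0 ≤ j → pvCell board i j ≠ 'D' →
    slideA board n m 0 1 f i j = (i, pvGrid2 (tabR board m) i j + 1) := by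
  intro rn
  induction rn with
  | zero =>
    intro f i j hj hf hi hin hj0 hD
    obtain ⟨f1, rfl⟩ : ∃ f1, f = f1 + 1 + 1 := ⟨f - 2, by omega⟩
    rw [slideA, if_pos ⟨hi, hin, hj0, by omega, hD⟩]
    have e1 : i + 0 = i := by ring
    rw [e1, slideA, if_neg (by rintro ⟨-, -, -, h4, -⟩; omega)]
    rw [tabR_rec board n m hg i j hi hin hj0 (by omega), if_pos (Or.inl (by omega))]
  | succ t ih =>
    intro f i j hj hf hi hin hj0 hD
    obtain ⟨f1, rfl⟩ : ∃ f1, f = f1 + 1 := ⟨f - 1, by omega⟩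
    rw [slideA, if_pos ⟨hi, hin, hj0, by omega, hD⟩]
    have e1 : i + 0 = i := by ring
    rw [e1]
    rw [tabR_rec board n m hg i j hi hin hj0 (by omega)]
    by_cases hD' : pvCell board i (j + 1) = 'D'
    · rw [if_pos (Or.inr hD')]
      obtain ⟨f2, rfl⟩ : ∃ f2, f1 = f2 + 1 := ⟨f1 - 1, by omega⟩
      rw [slideA, if_neg (by rintro ⟨-, -, -, -, hcell⟩; exact hcell hD')]
    · rw [if_neg (by push Not; exact ⟨by omega, hD'⟩)]
      exact ih f1 i (j + 1) (by omega) (by omega) hi hin (by omega) hD' 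

theorem slide_up (board : List String) (n m : Int) (hg : Good board n m) :
    ∀ (ikn f : Nat) (i j : Int), i = (ikn : Int) → ikn + 2 ≤ f →
    0 ≤ j → j < m → i < n → pvCell board i j ≠ 'D' →
    slideA board n m (-1) 0 f i j = (pvGrid2 (tabU board m) i j - 1, j) := by
  intro ikn
  induction ikn with
  | zero =>
    intro f i j hi hf hj hjm hin hD
    obtain ⟨f1, rfl⟩ : ∃ f1, f = f1 + 1 + 1 := ⟨f - 2, by omega⟩
    rw [slideA, if_pos ⟨by omega, hin, hj, hjm, hD⟩]
    have e2 : j + 0 = j := by ring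
    have e1 : i + -1 = -1 := by omega
    rw [e1, e2, slideA, if_neg (by rintro ⟨h1, -⟩; omega)]
    rw [tabU_rec board n m hg i j (by omega) hin hj hjm, if_pos (Or.inl (by omega))]
    rw [show i - 1 = -1 by omega]
  | succ t ih =>
    intro f i j hi hf hj hjm hin hD
    obtain ⟨f1, rfl⟩ : ∃ f1, f = f1 + 1 := ⟨f - 1, by omega⟩
    rw [slideA, if_pos ⟨by omega, hin, hj, hjm, hD⟩]
    have e1 : i + -1 = i - 1 := by ring
    have e2 : j + 0 = j := by ring
    rw [e1, e2]
    rw [tabU_rec board n m hg i j (by omega) hin hj hjm]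
    by_cases hD' : pvCell board (i - 1) j = 'D'
    · rw [if_pos (Or.inr hD')]
      obtain ⟨f2, rfl⟩ : ∃ f2, f1 = f2 + 1 := ⟨f1 - 1, by omega⟩
      rw [slideA, if_neg (by rintro ⟨-, -, -, -, hcell⟩; exact hcell hD')]
    · rw [if_neg (by push Not; exact ⟨by omega, hD'⟩)]
      exact ih f1 (i - 1) j (by omega) (by omega) hj hjm (by omega) hD' 

theorem slide_down (board : List String) (n m : Int) (hg : Good board n m) :
    ∀ (rn f : Nat) (i j : Int), n - 1 - i = (rn : Int) → rn + 2 ≤ f →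
    0 ≤ j → j < m → 0 ≤ i → pvCell board i j ≠ 'D' →
    slideA board n m 1 0 f i j = (pvGrid2 (tabD board m) i j + 1, j) := by
  intro rn
  induction rn with
  | zero =>
    intro f i j hi hf hj hjm hi0 hD
    obtain ⟨f1, rfl⟩ : ∃ f1, f = f1 + 1 + 1 := ⟨f - 2, by omega⟩
    rw [slideA, if_pos ⟨hi0, by omega, hj, hjm, hD⟩]
    have e2 : j + 0 = j := by ring
    rw [e2, slideA, if_neg (by rintro ⟨-, h2, -⟩; omega)]
    rw [tabD_rec board n m hg i j hi0 (by omega) hj hjm, if_pos (Or.inl (by omega))]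
  | succ t ih =>
    intro f i j hi hf hj hjm hi0 hD
    obtain ⟨f1, rfl⟩ : ∃ f1, f = f1 + 1 := ⟨f - 1, by omega⟩
    rw [slideA, if_pos ⟨hi0, by omega, hj, hjm, hD⟩]
    have e2 : j + 0 = j := by ring
    rw [e2]
    rw [tabD_rec board n m hg i j hi0 (by omega) hj hjm]
    by_cases hD' : pvCell board (i + 1) j = 'D'
    · rw [if_pos (Or.inr hD')]
      obtain ⟨f2, rfl⟩ : ∃ f2, f1 = f2 + 1 := ⟨f1 - 1, by omega⟩
      rw [slideA, if_neg (by rintro ⟨-, -, -, -, hcell⟩; exact hcell hD')]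
    · rw [if_neg (by push Not; exact ⟨by omega, hD'⟩)]
      exact ih f1 (i + 1) j (by omega) (by omega) hj hjm (by omega) hD' 

-- ---- one BFS step, A = B ----
theorem step0_eq (board : List String) (n m : Int) (hg : Good board n m) (i j : Int)
    (hi : 0 ≤ i) (hin : i < n) (hj : 0 ≤ j) (hjm : j < m) (st : List (Int × Int) × List (List Int)) :
    stepA board n m i j st 0 =
      if 0 < j ∧ pvCell board i (j - 1) ≠ 'D' then relaxB st i j i (pvGrid2 (tabL board m) i (j - 1)) else st := by
  unfold stepA
  rw [show pvDi 0 = 0 from rfl, show pvDj 0 = (-1 : Int) from rfl]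
  rw [show i + 0 = i from by ring, show j + -1 = j - 1 from by ring]
  by_cases hc : 0 < j ∧ pvCell board i (j - 1) ≠ 'D'
  · rw [if_neg (by push Not; exact ⟨by omega, by omega, by omega, by omega, hc.2⟩)]
    rw [slide_left board n m hg (j - 1).toNat (n.toNat + m.toNat + 2) i (j - 1)
      (by omega) (by omega) hi hin (by omega) hc.2]
    rw [if_pos hc]
    dsimp only
    rw [show i - 0 = i from by ring,
      show pvGrid2 (tabL board m) i (j - 1) - 1 - -1 = pvGrid2 (tabL board m) i (j - 1) from by ring]
    rfl
  · rw [if_neg hc]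
    rcases not_and_or.mp hc with h | h
    · exact if_pos (Or.inr (Or.inr (Or.inl (by omega))))
    · exact if_pos (Or.inr (Or.inr (Or.inr (Or.inr (not_not.mp h)))))

theorem step1_eq (board : List String) (n m : Int) (hg : Good board n m) (i j : Int)
    (hi : 0 ≤ i) (hin : i < n) (hj : 0 ≤ j) (hjm : j < m) (st : List (Int × Int) × List (List Int)) :
    stepA board n m i j st 1 =
      if 0 < i ∧ pvCell board (i - 1) j ≠ 'D' then relaxB st i j (pvGrid2 (tabU board m) (i - 1) j) j else st := by
  unfold stepA
  rw [show pvDi 1 = (-1 : Int) from rfl, show pvDj 1 = (0 : Int) from rfl]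
  rw [show i + -1 = i - 1 from by ring, show j + 0 = j from by ring]
  by_cases hc : 0 < i ∧ pvCell board (i - 1) j ≠ 'D'
  · rw [if_neg (by push Not; exact ⟨by omega, by omega, by omega, by omega, hc.2⟩)]
    rw [slide_up board n m hg (i - 1).toNat (n.toNat + m.toNat + 2) (i - 1) j
      (by omega) (by omega) hj hjm (by omega) hc.2]
    rw [if_pos hc]
    dsimp only
    rw [show j - 0 = j from by ring,
      show pvGrid2 (tabU board m) (i - 1) j - 1 - -1 = pvGrid2 (tabU board m) (i - 1) j from by ring]
    rfl
  · rw [if_neg hc]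
    rcases not_and_or.mp hc with h | h
    · exact if_pos (Or.inl (by omega))
    · exact if_pos (Or.inr (Or.inr (Or.inr (Or.inr (not_not.mp h)))))

theorem step2_eq (board : List String) (n m : Int) (hg : Good board n m) (i j : Int)
    (hi : 0 ≤ i) (hin : i < n) (hj : 0 ≤ j) (hjm : j < m) (st : List (Int × Int) × List (List Int)) :
    stepA board n m i j st 2 =
      if j < m - 1 ∧ pvCell board i (j + 1) ≠ 'D' then relaxB st i j i (pvGrid2 (tabR board m) i (j + 1)) else st := by
  unfold stepA
  rw [show pvDi 2 = (0 : Int) from rfl, show pvDj 2 = (1 : Int) from rfl]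
  rw [show i + 0 = i from by ring]
  by_cases hc : j < m - 1 ∧ pvCell board i (j + 1) ≠ 'D'
  · rw [if_neg (by push Not; exact ⟨by omega, by omega, by omega, by omega, hc.2⟩)]
    rw [slide_right board n m hg (m - 1 - (j + 1)).toNat (n.toNat + m.toNat + 2) i (j + 1)
      (by omega) (by omega) hi hin (by omega) hc.2]
    rw [if_pos hc]
    dsimp only
    rw [show i - 0 = i from by ring,
      show pvGrid2 (tabR board m) i (j + 1) + 1 - 1 = pvGrid2 (tabR board m) i (j + 1) from by ring]
    rfl
  · rw [if_neg hc]
    rcases not_and_or.mp hc with h | h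
    · exact if_pos (Or.inr (Or.inr (Or.inr (Or.inl (by omega)))))
    · exact if_pos (Or.inr (Or.inr (Or.inr (Or.inr (not_not.mp h)))))

theorem step3_eq (board : List String) (n m : Int) (hg : Good board n m) (i j : Int)
    (hi : 0 ≤ i) (hin : i < n) (hj : 0 ≤ j) (hjm : j < m) (st : List (Int × Int) × List (List Int)) :
    stepA board n m i j st 3 =
      if i < n - 1 ∧ pvCell board (i + 1) j ≠ 'D' then relaxB st i j (pvGrid2 (tabD board m) (i + 1) j) j else st := by
  unfold stepA
  rw [show pvDi 3 = (1 : Int) from rfl, show pvDj 3 = (0 : Int) from rfl]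
  rw [show j + 0 = j from by ring]
  by_cases hc : i < n - 1 ∧ pvCell board (i + 1) j ≠ 'D'
  · rw [if_neg (by push Not; exact ⟨by omega, by omega, by omega, by omega, hc.2⟩)]
    rw [slide_down board n m hg (n - 1 - (i + 1)).toNat (n.toNat + m.toNat + 2) (i + 1) j
      (by omega) (by omega) hj hjm (by omega) hc.2]
    rw [if_pos hc]
    dsimp only
    rw [show j - 0 = j from by ring,
      show pvGrid2 (tabD board m) (i + 1) j + 1 - 1 = pvGrid2 (tabD board m) (i + 1) j from by ring]
    rfl
  · rw [if_neg hc]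
    rcases not_and_or.mp hc with h | h
    · exact if_pos (Or.inr (Or.inl (by omega)))
    · exact if_pos (Or.inr (Or.inr (Or.inr (Or.inr (not_not.mp h)))))

theorem relaxB_queue (st : List (Int × Int) × List (List Int)) (i j ti tj : Int)
    (p : Int × Int) (hp : p ∈ (relaxB st i j ti tj).1) : p ∈ st.1 ∨ p = (ti, tj) := by
  by_cases h : pvGrid2 st.2 ti tj = -1
  · rw [relaxB, if_pos h] at hp
    simpa using hp
  · rw [relaxB, if_neg h] at hp
    exact Or.inl hp

theorem relax_inv (P : Int × Int → Prop) (st : List (Int × Int) × List (List Int))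
    (c : Prop) [Decidable c] (i j ti tj : Int)
    (hst : ∀ p ∈ st.1, P p) (ht : c → P (ti, tj)) :
    ∀ p ∈ (if c then relaxB st i j ti tj else st).1, P p := by
  intro p hp
  by_cases hc : c
  · rw [if_pos hc] at hp
    rcases relaxB_queue st i j ti tj p hp with h | h
    · exact hst p h
    · rw [h]; exact ht hc
  · rw [if_neg hc] at hp
    exact hst p hp

-- ---- BFS loops agree ----
theorem bfs_eq (board : List String) (n m : Int) (hg : Good board n m) :
    ∀ (f : Nat) (que : List (Int × Int)) (maps : List (List Int)),
    (∀ p ∈ que, 0 ≤ p.1 ∧ p.1 < n ∧ 0 ≤ p.2 ∧ p.2 < m) →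
    bfsA board n m f que maps =
      bfsB board n m (tabL board m) (tabU board m) (tabR board m) (tabD board m) f que maps := by
  obtain ⟨hn, hm0, hrow⟩ := hg
  intro f
  induction f with
  | zero => intro que maps hq; rfl
  | succ f ih =>
    intro que maps hq
    cases que with
    | nil => rfl
    | cons hd rest =>
      obtain ⟨i, j⟩ := hd
      obtain ⟨hi, hin, hj, hjm⟩ := hq (i, j) (by simp)
      have hrest : ∀ p ∈ rest, 0 ≤ p.1 ∧ p.1 < n ∧ 0 ≤ p.2 ∧ p.2 < m :=
        fun p hp => hq p (by simp [hp])
      simp only [bfsA, bfsB]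
      rw [show List.range 4 = [0, 1, 2, 3] from rfl]
      simp only [List.foldl_cons, List.foldl_nil]
      rw [step0_eq board n m ⟨hn, hm0, hrow⟩ i j hi hin hj hjm,
        step1_eq board n m ⟨hn, hm0, hrow⟩ i j hi hin hj hjm,
        step2_eq board n m ⟨hn, hm0, hrow⟩ i j hi hin hj hjm,
        step3_eq board n m ⟨hn, hm0, hrow⟩ i j hi hin hj hjm]
      refine ih _ _ ?_
      apply relax_inv (fun p => 0 ≤ p.1 ∧ p.1 < n ∧ 0 ≤ p.2 ∧ p.2 < m)
      · apply relax_inv (fun p => 0 ≤ p.1 ∧ p.1 < n ∧ 0 ≤ p.2 ∧ p.2 < m)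
        · apply relax_inv (fun p => 0 ≤ p.1 ∧ p.1 < n ∧ 0 ≤ p.2 ∧ p.2 < m)
          · apply relax_inv (fun p => 0 ≤ p.1 ∧ p.1 < n ∧ 0 ≤ p.2 ∧ p.2 < m)
            · exact hrest
            · intro hc
              have hb := tabL_bounds board n m ⟨hn, hm0, hrow⟩ i (j - 1) hi hin
                (by omega) (by omega)
              exact ⟨hi, hin, by omega, by omega⟩
          · intro hc
            have hb := tabU_bounds board n m ⟨hn, hm0, hrow⟩ (i - 1) j (by omega)
              (by omega) hj hjm
            exact ⟨by omega, by omega, hj, hjm⟩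
        · intro hc
          have hb := tabR_bounds board n m ⟨hn, hm0, hrow⟩ i (j + 1) hi hin
            (by omega) (by omega)
          exact ⟨hi, hin, by omega, by omega⟩
      · intro hc
        have hb := tabD_bounds board n m ⟨hn, hm0, hrow⟩ (i + 1) j (by omega)
          (by omega) hj hjm
        exact ⟨by omega, by omega, hj, hjm⟩

theorem solutions_agree (board : List String) (hpre : Pre_solution board) :
    solution board = solution_alt board := by
  obtain ⟨hne, hm0, hrows⟩ := hpre
  have hg : Good board (board.length : Int) (PySem.Str.len (board.headD "")) :=
    ⟨rfl, hm0, hrows⟩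
  simp only [solution, solution_alt]
  refine congrArg (fun st : List (List Int) × Int × Int => pvGrid2 st.1 st.2.1 st.2.2) ?_
  apply PySem.List.foldl_congr_mem'
  intro i hi acc
  apply PySem.List.foldl_congr_mem'
  intro j hj acc2
  have hi' : ∃ a : Nat, a < board.length ∧ i = ((a : Nat) : Int) := by simpa using hi
  obtain ⟨ia, hia, rfl⟩ := hi'
  have hj' : ∃ a : Nat, a < (board.headD "").length ∧ j = ((a : Nat) : Int) := by
    simpa [List.headD] using hj
  obtain ⟨ja, hja, rfl⟩ := hj'
  have hlen2 : PySem.Str.len (board.headD "") = ((board.headD "").length : Int) := by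
    rw [PySem.Str.len_eq, String.length_toList]
  by_cases hR : pvCell board ((ia : Nat) : Int) ((ja : Nat) : Int) = 'R'
  · have hb : dfsA board (board.length : Int) (PySem.Str.len (board.headD ""))
        ((ia : Nat) : Int) ((ja : Nat) : Int) acc2.1 =
        bfsB board (board.length : Int) (PySem.Str.len (board.headD ""))
          (tabL board (PySem.Str.len (board.headD "")))
          (tabU board (PySem.Str.len (board.headD "")))
          (tabR board (PySem.Str.len (board.headD "")))
          (tabD board (PySem.Str.len (board.headD "")))
          ((board.length : Int).toNat * (PySem.Str.len (board.headD "")).toNat + 2)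
          [(((ia : Nat) : Int), ((ja : Nat) : Int))]
          (pvSet2 acc2.1 ((ia : Nat) : Int) ((ja : Nat) : Int) 0) := by
      rw [dfsA]
      refine bfs_eq board _ _ hg _ _ _ ?_
      intro p hp
      simp only [List.mem_singleton] at hp
      subst hp
      exact ⟨by omega, by omega, by omega, by omega⟩
    simp only [if_pos hR, hb]
  · simp only [if_neg hR]

-- ===== VERDICT (by name: the statement is the Claim_ definition above) =====
theorem solution_spec : Claim_equal_solution := by
  intro board _ hpre
  show solution board = solution_alt board
  exact solutions_agree board hpre
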